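-- pv_equiv track=rewrite | github.com/TheAlgorithms/Python | project_euler/problem_138/sol1.py | solution
-- ===== SOURCE A (Python) =====
-- def solution(k: int = 12) -> int:
--     """
--     The recursive solution of negative Pell's equation with k + 1 values of L
--     summed and the first solution being skipped.
--
--     >>> solution(2)
--     322
--     >>> solution(5)
--     1866293
--     """
--
--     m_i = 2
--     l_i = 1
--     ans = 0
--     for _ in range(2, k + 2):
--         m_i, l_i = 4 * m_i + 5 * m_i + 20 * l_i, 4 * l_i + 5 * l_i + 4 * m_i
--         ans += l_i
--
--     return ans
-- ===== SOURCE B (Python) =====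
-- def solution(k: int = 12) -> int:
--     """Sum L_1..L_k via the single second-order recurrence L_n = 18*L_{n-1} - L_{n-2}."""
--     prev, cur, ans = 1, 17, 0
--     for _ in range(k):
--         ans += cur
--         prev, cur = cur, 18 * cur - prev
--     return ans
-- ===== Notes on version B (the rewrite author's own statement) =====
-- stated objective: simpler
-- what changed: Replaces the coupled (m,l) Pell-system update with the single second-order recurrence L_n = 18*L_{n-1} - L_{n-2}, keeping two consecutive L values instead of the (m,l) pair.
import Mathlib
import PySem

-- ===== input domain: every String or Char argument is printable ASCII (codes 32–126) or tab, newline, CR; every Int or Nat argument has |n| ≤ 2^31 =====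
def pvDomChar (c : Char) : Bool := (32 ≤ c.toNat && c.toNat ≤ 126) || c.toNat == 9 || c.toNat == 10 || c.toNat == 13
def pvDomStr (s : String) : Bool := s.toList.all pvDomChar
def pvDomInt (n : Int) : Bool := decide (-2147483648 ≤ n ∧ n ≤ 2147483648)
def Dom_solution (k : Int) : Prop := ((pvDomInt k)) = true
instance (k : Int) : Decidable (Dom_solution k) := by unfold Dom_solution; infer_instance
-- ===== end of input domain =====

-- B replaces A's coupled (m,l) update with the single recurrence L_n = 18*L_{n-1} - L_{n-2}; objective: simpler.

-- ===== PORT A =====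
def solution (k : Int) : Int :=
  (((PySem.List.pyRange 2 (k + 2) 1).foldl
      (fun (st : Int × Int × Int) _ =>
        let m_i := st.1
        let l_i := st.2.1
        let ans := st.2.2
        let m' := 4 * m_i + 5 * m_i + 20 * l_i
        let l' := 4 * l_i + 5 * l_i + 4 * m_i
        (m', l', ans + l'))
      (2, 1, 0)).2.2)

-- ===== PORT B =====
def solution_alt (k : Int) : Int :=
  (((PySem.List.pyRange 0 k 1).foldl
      (fun (st : Int × Int × Int) _ =>
        let prev := st.1
        let cur := st.2.1
        let ans := st.2.2
        (cur, 18 * cur - prev, ans + cur))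
      (1, 17, 0)).2.2)

-- ===== PRECONDITION & SPEC =====
def Spec_solution (k : Int) (out : Int) : Prop := out = solution_alt k
instance (k : Int) (out : Int) : Decidable (Spec_solution k out) := by unfold Spec_solution; infer_instance

-- ===== CLAIM (what is proved, stated in full; the proofs are below) =====
def Claim_equal_solution : Prop := ∀ (k : Int), Dom_solution k → Spec_solution k (solution k)

-- ===== LEMMAS AND PROOFS =====

-- A foldl that ignores the list elements is iteration of the step, length-many times.
theorem foldl_ignore {α β : Type} (g : α → α) (xs : List β) (init : α) :
    xs.foldl (fun s _ => g s) init = g^[xs.length] init := by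
  induction xs generalizing init with
  | nil => rfl
  | cons x xs ih => simp [List.foldl_cons, ih, Function.iterate_succ_apply]

def stepA (st : Int × Int × Int) : Int × Int × Int :=
  (4 * st.1 + 5 * st.1 + 20 * st.2.1,
   4 * st.2.1 + 5 * st.2.1 + 4 * st.1,
   st.2.2 + (4 * st.2.1 + 5 * st.2.1 + 4 * st.1))

def stepB (st : Int × Int × Int) : Int × Int × Int :=
  (st.2.1, 18 * st.2.1 - st.1, st.2.2 + st.2.1)

-- PellInvariant linking the two states after n iterations.
def PellInv (a b : Int × Int × Int) : Prop :=
  b.1 = a.2.1 ∧ b.2.1 = 4 * a.2.1 + 5 * a.2.1 + 4 * a.1 ∧ b.2.2 = a.2.2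

theorem inv_step {a b : Int × Int × Int} (h : PellInv a b) : PellInv (stepA a) (stepB b) := by
  obtain ⟨h1, h2, h3⟩ := h
  refine ⟨?_, ?_, ?_⟩ <;> simp [stepA, stepB, h1, h2, h3] <;> ring

theorem inv_iterate (n : Nat) : PellInv (stepA^[n] (2, 1, 0)) (stepB^[n] (1, 17, 0)) := by
  induction n with
  | zero => exact ⟨rfl, rfl, rfl⟩
  | succ n ih =>
    rw [Function.iterate_succ_apply', Function.iterate_succ_apply']
    exact inv_step ih

-- ===== VERDICT (by name: the statement is the Claim_ definition above) =====
theorem solution_spec : Claim_equal_solution := by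
  intro k _
  show solution k = solution_alt k
  have hA : solution k = (stepA^[(PySem.List.pyRange 2 (k + 2) 1).length] (2, 1, 0)).2.2 :=
    congrArg (fun p => p.2.2) (foldl_ignore stepA _ (2, 1, 0))
  have hB : solution_alt k = (stepB^[(PySem.List.pyRange 0 k 1).length] (1, 17, 0)).2.2 :=
    congrArg (fun p => p.2.2) (foldl_ignore stepB _ (1, 17, 0))
  rw [PySem.List.length_pyRange_one] at hA hB
  rw [hA, hB]
  have : (k + 2 - 2).toNat = (k - 0).toNat := by omega
  rw [this]
  exact ((inv_iterate (k - 0).toNat).2.2).symm
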